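-- pv_equiv track=rewrite | github.com/tsimur87/YouTube-download-script-android | yt_ru.py | parse_chapter_selection
-- ===== SOURCE A (Python) =====
-- def parse_chapter_selection(input_str, total_chapters):
--     selected = set()
--     try:
--         parts = input_str.split(',')
--         for part in parts:
--             part = part.strip()
--             if '-' in part:
--                 start, end = part.split('-')
--                 start, end = int(start.strip()), int(end.strip())
--                 if 1 <= start <= total_chapters and 1 <= end <= total_chapters and start <= end:
--                     selected.update(range(start, end + 1))
--             else:
--                 num = int(part)
--                 if 1 <= num <= total_chapters: selected.add(num)
--         return sorted(list(selected))
--     except Exception: return []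
-- ===== SOURCE B (Python) =====
-- def parse_chapter_selection(input_str, total_chapters):
--     # B: two stages instead of a set — parse each part into a validated
--     # (start, end) interval (a single number n becomes (n, n)), then sort the
--     # intervals by start and sweep them once, merging overlapping/adjacent
--     # intervals and emitting each merged run with range(); no set, no final
--     # sorted() over individual chapters.
--     def parse_part(part):
--         part = part.strip()
--         if '-' in part:
--             a, b = part.split('-')
--             a, b = int(a.strip()), int(b.strip())
--             if 1 <= a <= total_chapters and 1 <= b <= total_chapters and a <= b:
--                 return (a, b)
--             return None
--         n = int(part)
--         return (n, n) if 1 <= n <= total_chapters else None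
--
--     try:
--         intervals = [iv for iv in map(parse_part, input_str.split(',')) if iv is not None]
--     except Exception:
--         return []
--     intervals.sort(key=lambda t: t[0])
--     out = []
--     if intervals:
--         (s, e), rest = intervals[0], intervals[1:]
--         for s2, e2 in rest:
--             if s2 <= e + 1:
--                 if e2 > e:
--                     e = e2
--             else:
--                 out.extend(range(s, e + 1))
--                 s, e = s2, e2
--         out.extend(range(s, e + 1))
--     return out
-- ===== Notes on version B (the rewrite author's own statement) =====
-- stated objective: alternative
-- what changed: B replaces A's per-chapter set accumulation and final sorted() by a two-stage interval algorithm: parse parts into validated (start,end) intervals, sort the intervals by start, then sweep once merging overlapping/adjacent intervals and emitting each merged run with range().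
import Mathlib
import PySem

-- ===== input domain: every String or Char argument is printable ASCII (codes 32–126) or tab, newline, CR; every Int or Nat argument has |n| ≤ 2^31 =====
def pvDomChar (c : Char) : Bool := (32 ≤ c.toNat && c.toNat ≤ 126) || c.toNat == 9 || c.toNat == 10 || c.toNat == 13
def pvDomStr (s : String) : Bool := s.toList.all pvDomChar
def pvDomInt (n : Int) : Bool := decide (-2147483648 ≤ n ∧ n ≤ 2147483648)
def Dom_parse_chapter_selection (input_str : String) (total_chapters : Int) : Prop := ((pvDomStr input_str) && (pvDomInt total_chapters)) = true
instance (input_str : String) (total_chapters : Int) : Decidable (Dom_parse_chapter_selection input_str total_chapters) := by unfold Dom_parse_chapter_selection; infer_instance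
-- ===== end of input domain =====

-- B replaces A's per-chapter set + final sorted() by a two-stage interval algorithm:
-- parse parts into validated intervals, sort by start, sweep once merging and emitting ranges
-- (objective: alternative decomposition, same cost).


-- ===== PORT A =====
-- One iteration of A's loop; the Option state is `none` once an exception has been
-- raised (caught at the end: A returns []). Faithful to Source A step for step.
def pvStepA (total_chapters : Int) (st : Option (PySem.Set Int)) (part : List Char) :
    Option (PySem.Set Int) :=
  match st with
  | none => none
  | some selected =>
    let p := PySem.Chars.strip part
    if PySem.Chars.isIn ['-'] p then
      match PySem.Chars.splitOn p ['-'] with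
      | [s0, e0] =>
        match PySem.Int.ofChars? (PySem.Chars.strip s0), PySem.Int.ofChars? (PySem.Chars.strip e0) with
        | some start, some «end» =>
          if 1 ≤ start ∧ start ≤ total_chapters ∧ 1 ≤ «end» ∧ «end» ≤ total_chapters ∧ start ≤ «end» then
            some (PySem.Set.update selected (PySem.List.pyRange start («end» + 1) 1))
          else some selected
        | _, _ => none        -- int() raised ValueError
      | _ => none             -- unpacking `start, end = …` raised ValueError
    else
      match PySem.Int.ofChars? p with
      | some num => if 1 ≤ num ∧ num ≤ total_chapters then some (PySem.Set.add selected num) else some selected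
      | none => none          -- int() raised ValueError

def parse_chapter_selection (input_str : String) (total_chapters : Int) : List Int :=
  match (PySem.Chars.splitOn input_str.toList [',']).foldl (pvStepA total_chapters) (some PySem.Set.empty) with
  | some selected => PySem.List.sorted selected (fun x => x) false
  | none => []

-- ===== PORT B =====
-- Source B's parse_part: outer `none` = the exception int()/unpacking raised (caught by
-- the caller's try), inner `none` = Python's None (part out of range, skipped).
def pvParsePart (total_chapters : Int) (part : List Char) : Option (Option (Int × Int)) :=
  let p := PySem.Chars.strip part
  if PySem.Chars.isIn ['-'] p then
    match PySem.Chars.splitOn p ['-'] with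
    | [a0, b0] =>
      match PySem.Int.ofChars? (PySem.Chars.strip a0), PySem.Int.ofChars? (PySem.Chars.strip b0) with
      | some a, some b =>
        if 1 ≤ a ∧ a ≤ total_chapters ∧ 1 ≤ b ∧ b ≤ total_chapters ∧ a ≤ b then
          some (some (a, b))
        else some none
      | _, _ => none
    | _ => none
  else
    match PySem.Int.ofChars? p with
    | some n => if 1 ≤ n ∧ n ≤ total_chapters then some (some (n, n)) else some none
    | none => none

-- the comprehension `[iv for iv in map(parse_part, parts) if iv is not None]` under try
def pvParseParts (total_chapters : Int) : List (List Char) → Option (List (Int × Int))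
  | [] => some []
  | p :: ps =>
    match pvParsePart total_chapters p with
    | none => none
    | some none => pvParseParts total_chapters ps
    | some (some iv) => (pvParseParts total_chapters ps).map (iv :: ·)

-- Source B's sweep loop: `out` is the emitted prefix, (s, e) the current merged run,
-- the list argument the unread intervals; `out.extend(range(s, e+1))` emits a run.
def pvSweep (out : List Int) (s e : Int) : List (Int × Int) → List Int
  | [] => out ++ PySem.List.pyRange s (e + 1) 1
  | (s2, e2) :: rest =>
    if s2 ≤ e + 1 then pvSweep out s (if e2 > e then e2 else e) rest
    else pvSweep (out ++ PySem.List.pyRange s (e + 1) 1) s2 e2 rest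

def parse_chapter_selection_alt (input_str : String) (total_chapters : Int) : List Int :=
  match pvParseParts total_chapters (PySem.Chars.splitOn input_str.toList [',']) with
  | none => []
  | some intervals =>
    match PySem.List.sorted intervals (fun t => t.1) false with
    | [] => []
    | (s, e) :: rest => pvSweep [] s e rest

-- ===== PRECONDITION & SPEC =====
def Spec_parse_chapter_selection (input_str : String) (total_chapters : Int) (out : List Int) : Prop := out = parse_chapter_selection_alt input_str total_chapters
instance (input_str : String) (total_chapters : Int) (out : List Int) : Decidable (Spec_parse_chapter_selection input_str total_chapters out) := by unfold Spec_parse_chapter_selection; infer_instance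

-- ===== CLAIM (what is proved, stated in full; the proofs are below) =====
def Claim_equal_parse_chapter_selection : Prop := ∀ (input_str : String) (total_chapters : Int), Dom_parse_chapter_selection input_str total_chapters → Spec_parse_chapter_selection input_str total_chapters (parse_chapter_selection input_str total_chapters)

-- ===== LEMMAS AND PROOFS =====

theorem pvSweep_eq_append (out : List Int) (s e : Int) (rest : List (Int × Int)) :
    pvSweep out s e rest = out ++ pvSweep [] s e rest := by
  induction rest generalizing out s e with
  | nil => simp [pvSweep]
  | cons iv rest ih =>
    obtain ⟨s2, e2⟩ := iv
    by_cases h : s2 ≤ e + 1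
    · rw [pvSweep, pvSweep, if_pos h, if_pos h, ih out, ih []]
    · rw [pvSweep, pvSweep, if_neg h, if_neg h,
        ih (out ++ PySem.List.pyRange s (e + 1) 1), ih ([] ++ PySem.List.pyRange s (e + 1) 1)]
      simp

theorem mem_pvSweep (s e : Int) (rest : List (Int × Int)) (a : Int)
    (hse : s ≤ e)
    (hval : ∀ iv ∈ rest, iv.1 ≤ iv.2)
    (hlo : ∀ iv ∈ rest, s ≤ iv.1)
    (hsort : rest.Pairwise (fun p q => p.1 ≤ q.1)) :
    a ∈ pvSweep [] s e rest ↔ (s ≤ a ∧ a ≤ e) ∨ ∃ iv ∈ rest, iv.1 ≤ a ∧ a ≤ iv.2 := by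
  induction rest generalizing s e with
  | nil =>
    rw [pvSweep, List.nil_append]
    simp only [PySem.List.mem_pyRange_one, List.not_mem_nil, false_and, exists_false, or_false]
    omega
  | cons iv rest ih =>
    obtain ⟨s2, e2⟩ := iv
    rw [List.pairwise_cons] at hsort
    have hs2 : s ≤ s2 := hlo (s2, e2) (by simp)
    have hv2 : s2 ≤ e2 := hval (s2, e2) (by simp)
    by_cases h : s2 ≤ e + 1
    · rw [pvSweep, if_pos h, show (if e2 > e then e2 else e) = max e e2 from by split <;> omega]
      rw [ih s (max e e2) (by omega)
        (fun iv h => hval iv (by simp [h])) (fun iv h => le_trans hs2 (hsort.1 iv h)) hsort.2]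
      constructor
      · rintro (⟨h1, h2⟩ | ⟨iv, hm, h1, h2⟩)
        · by_cases ha : a ≤ e
          · exact Or.inl ⟨h1, ha⟩
          · exact Or.inr ⟨(s2, e2), by simp, by dsimp; omega⟩
        · exact Or.inr ⟨iv, by simp [hm], h1, h2⟩
      · rintro (⟨h1, h2⟩ | ⟨iv, hm, h1, h2⟩)
        · exact Or.inl ⟨h1, by omega⟩
        · rcases List.mem_cons.mp hm with rfl | hm
          · exact Or.inl (by dsimp at h1 h2; omega)
          · exact Or.inr ⟨iv, hm, h1, h2⟩
    · rw [pvSweep, if_neg h, pvSweep_eq_append]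
      rw [List.mem_append, ih s2 e2 hv2 (fun iv h => hval iv (by simp [h])) hsort.1 hsort.2]
      simp only [List.nil_append, PySem.List.mem_pyRange_one, List.mem_cons]
      constructor
      · rintro (⟨h1, h2⟩ | ⟨h1, h2⟩ | ⟨iv, hm, h1, h2⟩)
        · exact Or.inl ⟨h1, by omega⟩
        · exact Or.inr ⟨(s2, e2), by simp, h1, h2⟩
        · exact Or.inr ⟨iv, by simp [hm], h1, h2⟩
      · rintro (⟨h1, h2⟩ | ⟨iv, hm, h1, h2⟩)
        · exact Or.inl ⟨h1, by omega⟩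
        · rcases hm with rfl | hm
          · exact Or.inr (Or.inl ⟨h1, h2⟩)
          · exact Or.inr (Or.inr ⟨iv, hm, h1, h2⟩)

theorem pvSweep_sorted (s e : Int) (rest : List (Int × Int))
    (hse : s ≤ e)
    (hval : ∀ iv ∈ rest, iv.1 ≤ iv.2)
    (hlo : ∀ iv ∈ rest, s ≤ iv.1)
    (hsort : rest.Pairwise (fun p q => p.1 ≤ q.1)) :
    (pvSweep [] s e rest).Pairwise (· < ·) ∧ ∀ x ∈ pvSweep [] s e rest, s ≤ x := by
  induction rest generalizing s e with
  | nil =>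
    refine ⟨by simpa [pvSweep] using PySem.List.pairwise_lt_pyRange_one s (e + 1), ?_⟩
    intro x hx
    simp only [pvSweep, List.nil_append, PySem.List.mem_pyRange_one] at hx
    exact hx.1
  | cons iv rest ih =>
    obtain ⟨s2, e2⟩ := iv
    rw [List.pairwise_cons] at hsort
    have hs2 : s ≤ s2 := hlo (s2, e2) (by simp)
    have hv2 : s2 ≤ e2 := hval (s2, e2) (by simp)
    by_cases h : s2 ≤ e + 1
    · rw [pvSweep, if_pos h]
      exact ih s (if e2 > e then e2 else e) (by split <;> omega)
        (fun iv h => hval iv (by simp [h])) (fun iv h => le_trans hs2 (hsort.1 iv h)) hsort.2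

    · rw [pvSweep, if_neg h, pvSweep_eq_append]
      obtain ⟨hp, hlow⟩ := ih s2 e2 hv2 (fun iv h => hval iv (by simp [h])) hsort.1 hsort.2
      constructor
      · rw [List.pairwise_append]
        refine ⟨PySem.List.pairwise_lt_pyRange_one s (e + 1), hp, ?_⟩
        intro x hx y hy
        rw [List.nil_append, PySem.List.mem_pyRange_one] at hx
        have := hlow y hy
        omega
      · intro x hx
        rcases List.mem_append.mp hx with hx | hx
        · exact (PySem.List.mem_pyRange_one.mp (List.nil_append _ ▸ hx)).1
        · have := hlow x hx; omega

theorem foldA_none (tc : Int) (ps : List (List Char)) :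
    ps.foldl (pvStepA tc) none = none := by
  induction ps with
  | nil => rfl
  | cons p ps ih => simpa [pvStepA] using ih

-- A's one step, read through B's parse_part: same parse, same validation.
theorem pvStepA_parsePart (tc : Int) (sel : PySem.Set Int) (p : List Char) (hnd : sel.Nodup) :
    match pvParsePart tc p with
    | none => pvStepA tc (some sel) p = none
    | some none => pvStepA tc (some sel) p = some sel
    | some (some (s, e)) => 1 ≤ s ∧ s ≤ e ∧ ∃ sel', pvStepA tc (some sel) p = some sel' ∧
        sel'.Nodup ∧ ∀ a, a ∈ sel' ↔ a ∈ sel ∨ (s ≤ a ∧ a ≤ e) := by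
  rw [pvStepA, pvParsePart]
  by_cases hdash : PySem.Chars.isIn ['-'] (PySem.Chars.strip p) = true
  · rw [if_pos hdash, if_pos hdash]
    rcases hsp : PySem.Chars.splitOn (PySem.Chars.strip p) ['-'] with _ | ⟨s0, _ | ⟨e0, _ | _⟩⟩
    · simp
    · simp
    · dsimp only
      rcases hA : PySem.Int.ofChars? (PySem.Chars.strip s0) with _ | st
      · rcases hB : PySem.Int.ofChars? (PySem.Chars.strip e0) with _ | en <;> simp
      rcases hB : PySem.Int.ofChars? (PySem.Chars.strip e0) with _ | en
      · simp
      dsimp only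
      by_cases hok : 1 ≤ st ∧ st ≤ tc ∧ 1 ≤ en ∧ en ≤ tc ∧ st ≤ en
      · rw [if_pos hok, if_pos hok]
        refine ⟨hok.1, hok.2.2.2.2, PySem.Set.update sel (PySem.List.pyRange st (en + 1) 1), rfl,
          PySem.Set.nodup_update sel _ hnd, ?_⟩
        intro a
        rw [PySem.Set.mem_update, PySem.List.mem_pyRange_one]
        exact or_congr Iff.rfl (by omega)
      · rw [if_neg hok, if_neg hok]
    · simp
  · rw [if_neg hdash, if_neg hdash]
    rcases hN : PySem.Int.ofChars? (PySem.Chars.strip p) with _ | num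
    · simp
    dsimp only
    by_cases hok : 1 ≤ num ∧ num ≤ tc
    · rw [if_pos hok, if_pos hok]
      refine ⟨hok.1, le_refl num, PySem.Set.add sel num, rfl, PySem.Set.nodup_add sel num hnd, ?_⟩
      intro a
      rw [PySem.Set.mem_add]
      exact or_congr Iff.rfl (by omega)
    · rw [if_neg hok, if_neg hok]

-- A's whole loop, read through B's parse stage.
theorem foldA_parseParts (tc : Int) (parts : List (List Char)) (sel : PySem.Set Int)
    (hnd : sel.Nodup) :
    match pvParseParts tc parts with
    | none => parts.foldl (pvStepA tc) (some sel) = none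
    | some ivs => (∀ iv ∈ ivs, 1 ≤ iv.1 ∧ iv.1 ≤ iv.2) ∧
        ∃ sel', parts.foldl (pvStepA tc) (some sel) = some sel' ∧ sel'.Nodup ∧
          ∀ a, a ∈ sel' ↔ a ∈ sel ∨ ∃ iv ∈ ivs, iv.1 ≤ a ∧ a ≤ iv.2 := by
  induction parts generalizing sel with
  | nil => exact ⟨by simp, sel, rfl, hnd, by simp⟩
  | cons p ps ih =>
    have hstep := pvStepA_parsePart tc sel p hnd
    rw [pvParseParts, List.foldl_cons]
    rcases hp : pvParsePart tc p with _ | ⟨_ | ⟨s, e⟩⟩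
    · rw [hp] at hstep; dsimp only at hstep ⊢
      rw [hstep]; exact foldA_none tc ps
    · rw [hp] at hstep; dsimp only at hstep ⊢
      rw [hstep]; exact ih sel hnd
    · rw [hp] at hstep; dsimp only at hstep ⊢
      obtain ⟨h1s, hse, sel1, heq, hnd1, hmem1⟩ := hstep
      rw [heq]
      have hih := ih sel1 hnd1
      rcases hps : pvParseParts tc ps with _ | ivs
      · rw [hps] at hih; exact hih
      · rw [hps] at hih
        obtain ⟨hval, sel', heq', hnd', hmem'⟩ := hih
        dsimp only [Option.map_some]
        refine ⟨?_, sel', heq', hnd', ?_⟩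
        · rintro iv hiv
          rcases List.mem_cons.mp hiv with rfl | hiv
          · exact ⟨h1s, hse⟩
          · exact hval iv hiv
        · intro a
          rw [hmem' a, hmem1 a]
          constructor
          · rintro ((h | h) | ⟨iv, hm, h⟩)
            · exact Or.inl h
            · exact Or.inr ⟨(s, e), by simp, h⟩
            · exact Or.inr ⟨iv, by simp [hm], h⟩
          · rintro (h | ⟨iv, hm, h⟩)
            · exact Or.inl (Or.inl h)
            · rcases List.mem_cons.mp hm with rfl | hm
              · exact Or.inl (Or.inr h)
              · exact Or.inr ⟨iv, hm, h⟩

-- ===== VERDICT (by name: the statement is the Claim_ definition above) =====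
theorem parse_chapter_selection_spec : Claim_equal_parse_chapter_selection := by
  intro input_str total_chapters _
  unfold Spec_parse_chapter_selection parse_chapter_selection parse_chapter_selection_alt
  have h := foldA_parseParts total_chapters (PySem.Chars.splitOn input_str.toList [','])
    PySem.Set.empty List.nodup_nil
  rcases hps : pvParseParts total_chapters (PySem.Chars.splitOn input_str.toList [',']) with _ | ivs
  · rw [hps] at h; dsimp only at h; rw [h]
  · rw [hps] at h
    obtain ⟨hval, sel', heq', hnd', hmem'⟩ := h
    rw [heq']
    dsimp only
    have hperm : (PySem.List.sorted ivs (fun t => t.1) false).Perm ivs :=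
      PySem.List.sorted_perm ivs (fun t => t.1) false
    have hvalS : ∀ iv ∈ PySem.List.sorted ivs (fun t => t.1) false, 1 ≤ iv.1 ∧ iv.1 ≤ iv.2 :=
      fun iv hiv => hval iv (hperm.mem_iff.mp hiv)
    have hsortS : (PySem.List.sorted ivs (fun t => t.1) false).Pairwise (fun p q => p.1 ≤ q.1) :=
      PySem.List.sorted_pairwise ivs (fun t => t.1)
    have hmemS : ∀ a, a ∈ sel' ↔ ∃ iv ∈ PySem.List.sorted ivs (fun t => t.1) false, iv.1 ≤ a ∧ a ≤ iv.2 := by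
      intro a
      rw [hmem' a]
      simp only [PySem.Set.empty, List.not_mem_nil, false_or]
      constructor
      · rintro ⟨iv, hm, h⟩; exact ⟨iv, hperm.mem_iff.mpr hm, h⟩
      · rintro ⟨iv, hm, h⟩; exact ⟨iv, hperm.mem_iff.mp hm, h⟩
    rcases hs : PySem.List.sorted ivs (fun t => t.1) false with _ | ⟨⟨s, e⟩, rest⟩
    · have hnil : sel' = [] := by
        rw [List.eq_nil_iff_forall_not_mem]
        intro a ha
        rcases (hmemS a).mp ha with ⟨iv, hm, _⟩
        rw [hs] at hm; exact absurd hm (List.not_mem_nil)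
      rw [hnil]; rfl
    · rw [hs] at hvalS hsortS hmemS
      show _ = pvSweep [] s e rest
      rw [List.pairwise_cons] at hsortS
      have hse : s ≤ e := (hvalS (s, e) (by simp)).2
      have hrval : ∀ iv ∈ rest, iv.1 ≤ iv.2 := fun iv h => (hvalS iv (by simp [h])).2
      have hrlo : ∀ iv ∈ rest, s ≤ iv.1 := fun iv h => hsortS.1 iv h
      obtain ⟨hpw, _⟩ := pvSweep_sorted s e rest hse hrval hrlo hsortS.2
      refine PySem.List.sorted_eq_of_perm_of_pairwise_lt sel' (pvSweep [] s e rest) (fun x => x)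
        ?_ (by simpa using hpw)
      refine (List.perm_ext_iff_of_nodup hpw.nodup hnd').mpr ?_
      intro a
      rw [hmemS a, mem_pvSweep s e rest a hse hrval hrlo hsortS.2]
      simp only [List.mem_cons]
      constructor
      · rintro (⟨h1, h2⟩ | ⟨iv, hm, h⟩)
        · exact ⟨(s, e), Or.inl rfl, h1, h2⟩
        · exact ⟨iv, Or.inr hm, h⟩
      · rintro ⟨iv, rfl | hm, h⟩
        · exact Or.inl h
        · exact Or.inr ⟨iv, hm, h⟩
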